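-- pv_equiv track=rewrite | github.com/b-ciq/brand-assets-ecosystem | core-mcp-dev/server.py | _classify_assets_by_intent
-- ===== SOURCE A (Python) =====
-- from typing import Optional, Dict, Any, List, Tuple
--
-- def _classify_assets_by_intent(assets: List[Dict]) -> Dict[str, List[Dict]]:
--     """Classify assets based on their type and properties"""
--     classification = {
--         'all': assets,
--         'logos': [],
--         'documents': [],
--         'sales_materials': [],
--         'technical_docs': [],
--         'visual_assets': []
--     }
--
--     for asset in assets:
--         if asset['type'] == 'document':
--             classification['documents'].append(asset)
--             # Further classify documents by content type
--             doc_type = asset.get('doc_type', '').lower()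
--             if any(term in doc_type for term in ['brief', 'overview', 'summary', 'sales']):
--                 classification['sales_materials'].append(asset)
--             elif any(term in doc_type for term in ['spec', 'technical', 'guide', 'manual']):
--                 classification['technical_docs'].append(asset)
--         else:
--             classification['logos'].append(asset)
--             classification['visual_assets'].append(asset)
--
--     return classification
-- ===== SOURCE B (Python) =====
-- SALES_TERMS = ['brief', 'overview', 'summary', 'sales']
-- TECH_TERMS = ['spec', 'technical', 'guide', 'manual']
--
--
-- def _has_term(asset, terms):
--     doc_type = asset.get('doc_type', '').lower()
--     return any(term in doc_type for term in terms)
--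
--
-- def _classify_assets_by_intent(assets):
--     """Classify assets based on their type and properties."""
--     documents = [a for a in assets if a['type'] == 'document']
--     non_documents = [a for a in assets if a['type'] != 'document']
--     return {
--         'all': assets,
--         'logos': non_documents,
--         'documents': documents,
--         'sales_materials': [a for a in documents if _has_term(a, SALES_TERMS)],
--         'technical_docs': [a for a in documents
--                            if not _has_term(a, SALES_TERMS)
--                            and _has_term(a, TECH_TERMS)],
--         'visual_assets': list(non_documents),
--     }
-- ===== Notes on version B (the rewrite author's own statement) =====
-- stated objective: simpler
-- what changed: Replaces the single branching accumulate-into-dict loop by independent filter comprehensions: documents/non-documents are partitions of assets, and sales_materials/technical_docs are derived by filtering documents with a shared term-matching helper (tech filter repeats the sales test negated to keep the elif exclusivity).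
import Mathlib
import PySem

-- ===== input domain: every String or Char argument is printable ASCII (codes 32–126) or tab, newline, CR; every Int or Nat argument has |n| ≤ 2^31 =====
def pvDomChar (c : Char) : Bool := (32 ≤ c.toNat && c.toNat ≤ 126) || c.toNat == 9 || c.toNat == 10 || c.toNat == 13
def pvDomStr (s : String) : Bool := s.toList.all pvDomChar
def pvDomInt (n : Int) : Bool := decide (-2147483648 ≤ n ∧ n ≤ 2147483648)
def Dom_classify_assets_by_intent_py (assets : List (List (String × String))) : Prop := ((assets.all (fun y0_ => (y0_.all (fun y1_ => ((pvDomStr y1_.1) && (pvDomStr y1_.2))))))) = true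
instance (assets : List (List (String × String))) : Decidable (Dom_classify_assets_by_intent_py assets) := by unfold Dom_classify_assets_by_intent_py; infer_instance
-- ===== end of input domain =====

-- B replaces A's single branching loop by independent filter passes (simpler decomposition, same cost).
-- Equivalence is about return values; 'all' aliases the argument in both Pythons.

-- shared dict-as-assoc-list primitives: d[k] (first match) and d.get(k, dflt)
def pvGetKey (a : List (String × String)) (k : String) : Option String :=
  (a.find? (fun p => p.1 == k)).map (·.2)

def pvGetKeyD (a : List (String × String)) (k dflt : String) : String :=
  (pvGetKey a k).getD dflt

def pvSalesTerms : List String := ["brief", "overview", "summary", "sales"]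
def pvTechTerms : List String := ["spec", "technical", "guide", "manual"]

-- ===== PORT A =====
-- A's loop: one pass appending each asset to the buckets the branches select.
def pvLoopA (assets : List (List (String × String)))
    (st : List (List (String × String)) × List (List (String × String)) ×
          List (List (String × String)) × List (List (String × String)) ×
          List (List (String × String))) :
    List (List (String × String)) × List (List (String × String)) ×
    List (List (String × String)) × List (List (String × String)) ×
    List (List (String × String)) :=
  match assets, st with
  | [], st => st
  | a :: rest, (logos, docs, sales, tech, visual) =>
    if pvGetKey a "type" == some "document" then
      let doc_type := PySem.Str.lower (pvGetKeyD a "doc_type" "")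
      if pvSalesTerms.any (fun t => PySem.Str.isIn t doc_type) then
        pvLoopA rest (logos, docs ++ [a], sales ++ [a], tech, visual)
      else if pvTechTerms.any (fun t => PySem.Str.isIn t doc_type) then
        pvLoopA rest (logos, docs ++ [a], sales, tech ++ [a], visual)
      else
        pvLoopA rest (logos, docs ++ [a], sales, tech, visual)
    else
      pvLoopA rest (logos ++ [a], docs, sales, tech, visual ++ [a])

def classify_assets_by_intent_py (assets : List (List (String × String))) : List (String × List (List (String × String))) :=
  match pvLoopA assets ([], [], [], [], []) with
  | (logos, docs, sales, tech, visual) =>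
    [("all", assets), ("logos", logos), ("documents", docs),
     ("sales_materials", sales), ("technical_docs", tech), ("visual_assets", visual)]

-- ===== PORT B =====
def pvHasTerm (a : List (String × String)) (terms : List String) : Bool :=
  terms.any (fun t => PySem.Str.isIn t (PySem.Str.lower (pvGetKeyD a "doc_type" "")))

def classify_assets_by_intent_py_alt (assets : List (List (String × String))) : List (String × List (List (String × String))) :=
  let documents := assets.filter (fun a => pvGetKey a "type" == some "document")
  let non_documents := assets.filter (fun a => !(pvGetKey a "type" == some "document"))
  [("all", assets),
   ("logos", non_documents),
   ("documents", documents),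
   ("sales_materials", documents.filter (fun a => pvHasTerm a pvSalesTerms)),
   ("technical_docs", documents.filter (fun a => !(pvHasTerm a pvSalesTerms) && pvHasTerm a pvTechTerms)),
   ("visual_assets", non_documents)]

-- ===== PRECONDITION & SPEC =====
-- Pre_ excludes exactly the inputs where a['type'] raises KeyError (some asset lacks a 'type' key).
def Pre_classify_assets_by_intent_py (assets : List (List (String × String))) : Prop :=
  assets.all (fun a => (pvGetKey a "type").isSome) = true
instance (assets : List (List (String × String))) : Decidable (Pre_classify_assets_by_intent_py assets) := by
  unfold Pre_classify_assets_by_intent_py; infer_instance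

def pvWitness_classify_assets_by_intent_py : (List (List (String × String))) :=
  [[("type", "document"), ("doc_type", "Sales Brief")], [("type", "logo")], [("type", "document"), ("doc_type", "tech spec")]]

def Spec_classify_assets_by_intent_py (assets : List (List (String × String))) (out : List (String × List (List (String × String)))) : Prop := out = classify_assets_by_intent_py_alt assets
instance (assets : List (List (String × String))) (out : List (String × List (List (String × String)))) : Decidable (Spec_classify_assets_by_intent_py assets out) := by unfold Spec_classify_assets_by_intent_py; infer_instance

-- ===== CLAIM (what is proved, stated in full; the proofs are below) =====
def Claim_equal_classify_assets_by_intent_py : Prop := ∀ (assets : List (List (String × String))), Dom_classify_assets_by_intent_py assets → Pre_classify_assets_by_intent_py assets → Spec_classify_assets_by_intent_py assets (classify_assets_by_intent_py assets)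

-- ===== LEMMAS AND PROOFS =====
theorem pvLoopA_eq_filters (assets : List (List (String × String)))
    (logos docs sales tech visual : List (List (String × String))) :
    pvLoopA assets (logos, docs, sales, tech, visual) =
      (logos ++ assets.filter (fun a => !(pvGetKey a "type" == some "document")),
       docs ++ assets.filter (fun a => pvGetKey a "type" == some "document"),
       sales ++ assets.filter (fun a => (pvGetKey a "type" == some "document") && pvHasTerm a pvSalesTerms),
       tech ++ assets.filter (fun a => (pvGetKey a "type" == some "document") && (!(pvHasTerm a pvSalesTerms) && pvHasTerm a pvTechTerms)),
       visual ++ assets.filter (fun a => !(pvGetKey a "type" == some "document"))) := by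
  induction assets generalizing logos docs sales tech visual with
  | nil => simp [pvLoopA]
  | cons a rest ih =>
    have hS : (pvSalesTerms.any fun t => PySem.Str.isIn t (PySem.Str.lower (pvGetKeyD a "doc_type" ""))) = pvHasTerm a pvSalesTerms := rfl
    have hT : (pvTechTerms.any fun t => PySem.Str.isIn t (PySem.Str.lower (pvGetKeyD a "doc_type" ""))) = pvHasTerm a pvTechTerms := rfl
    simp only [pvLoopA, List.filter_cons, hS, hT]
    cases hd : (pvGetKey a "type" == some "document") <;>
      cases hs : pvHasTerm a pvSalesTerms <;>
        cases ht : pvHasTerm a pvTechTerms <;>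
          simp [hd, hs, ht, ih, List.append_assoc]

theorem classify_assets_by_intent_py_eq (assets : List (List (String × String))) :
    classify_assets_by_intent_py assets = classify_assets_by_intent_py_alt assets := by
  simp only [classify_assets_by_intent_py, classify_assets_by_intent_py_alt,
    pvLoopA_eq_filters, List.nil_append, List.filter_filter]
  simp [Bool.and_comm]

-- ===== VERDICT (by name: the statement is the Claim_ definition above) =====
theorem classify_assets_by_intent_py_spec : Claim_equal_classify_assets_by_intent_py := by
  intro assets _ _
  unfold Spec_classify_assets_by_intent_py
  exact classify_assets_by_intent_py_eq assets
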